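-- pv_equiv track=rewrite | github.com/jmhuang1995/Tetris_Ai | halgo.py | blocks_above_hole_amount
-- ===== SOURCE A (Python) =====
-- def empty_(cell):
--     return cell == 0
--
-- def blocked_(cell):
--     return cell != 0
--
-- def find_holes(board):
--     holes = []
--     blocks_in_colunm = False
--     for x in range(len(board[0])):
--         for y in range(len(board)):
--             if blocks_in_colunm and empty_(board[y][x]):
--                 holes.append((x,y))
--             elif blocked_(board[y][x]):
--                 blocks_in_colunm = True
--         blocks_in_colunm = False
--     return holes
--
-- def blocks_above_hole_amount(board):
--     i = 0
--     for hole_x, hole_y in find_holes(board):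
--         for y in range(hole_y-1, 0, -1):
--             if blocked_(board[y][hole_x]):
--                 i += 1
--             else:
--                 break
--     return i
-- ===== SOURCE B (Python) =====
-- def blocks_above_hole_amount(board):
--     # A block contributes once if some empty cell lies below it in its column;
--     # blocks in the top row are never counted.
--     total = 0
--     for x in range(len(board[0])):
--         covered = False
--         for y in range(len(board) - 1, 0, -1):
--             if board[y][x] == 0:
--                 covered = True
--             elif covered:
--                 total += 1
--     return total
-- ===== Notes on version B (the rewrite author's own statement) =====
-- stated objective: simpler
-- what changed: B drops find_holes and the per-hole upward rescan of A entirely: one bottom-up pass per column counts each block (top row excluded) that has an empty cell below it; Pre_ excludes only the inputs where A raises IndexError (empty board, or a row shorter than row 0).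
import Mathlib
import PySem

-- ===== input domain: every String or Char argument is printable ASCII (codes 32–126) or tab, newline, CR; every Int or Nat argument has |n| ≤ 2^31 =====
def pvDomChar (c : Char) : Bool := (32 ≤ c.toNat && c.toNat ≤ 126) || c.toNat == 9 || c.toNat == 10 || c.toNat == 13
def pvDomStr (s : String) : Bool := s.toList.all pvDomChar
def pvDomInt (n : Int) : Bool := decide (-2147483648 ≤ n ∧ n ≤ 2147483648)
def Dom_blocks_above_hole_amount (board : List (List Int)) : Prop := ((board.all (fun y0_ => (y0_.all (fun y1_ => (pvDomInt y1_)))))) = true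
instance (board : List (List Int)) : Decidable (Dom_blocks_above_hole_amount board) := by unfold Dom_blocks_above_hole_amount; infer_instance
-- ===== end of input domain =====

-- B replaces A's find_holes list plus per-hole upward rescan by one bottom-up pass per column
-- counting each block that has an empty cell below it (objective: simpler, one plain pass).

-- ===== PORT A =====
def pvEmpty (cell : Int) : Bool := cell == 0
def pvBlocked (cell : Int) : Bool := cell != 0

def pvFindHoles (board : List (List Int)) : List (Int × Int) :=
  (PySem.List.pyRange 0 ((board.headD []).length : Int) 1).foldl (fun holes x =>
    ((PySem.List.pyRange 0 (board.length : Int) 1).foldl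
      (fun (st : List (Int × Int) × Bool) y =>
        let cell := PySem.List.pyGetD (PySem.List.pyGetD board y []) x 0
        if st.2 && pvEmpty cell then (st.1 ++ [(x, y)], st.2)
        else if pvBlocked cell then (st.1, true)
        else st) (holes, false)).1) []

def blocks_above_hole_amount (board : List (List Int)) : Int :=
  (pvFindHoles board).foldl (fun i h =>
    ((PySem.List.pyRange (h.2 - 1) 0 (-1)).foldl
      (fun (st : Int × Bool) y =>
        if st.2 then st
        else if pvBlocked (PySem.List.pyGetD (PySem.List.pyGetD board y []) h.1 0) then (st.1 + 1, false)
        else (st.1, true)) (i, false)).1) 0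

-- ===== PORT B =====
def blocks_above_hole_amount_alt (board : List (List Int)) : Int :=
  (PySem.List.pyRange 0 ((board.headD []).length : Int) 1).foldl (fun total x =>
    ((PySem.List.pyRange ((board.length : Int) - 1) 0 (-1)).foldl
      (fun (st : Int × Bool) y =>
        if PySem.List.pyGetD (PySem.List.pyGetD board y []) x 0 == 0 then (st.1, true)
        else if st.2 then (st.1 + 1, st.2)
        else st) (total, false)).1) 0

-- ===== PRECONDITION & SPEC =====
-- Pre_ excludes exactly the inputs where Python A raises an IndexError: the empty board
-- (board[0]) and ragged boards having a row shorter than row 0 (board[y][x]).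
def Pre_blocks_above_hole_amount (board : List (List Int)) : Prop :=
  board ≠ [] ∧ ∀ row ∈ board, (board.headD []).length ≤ row.length
instance (board : List (List Int)) : Decidable (Pre_blocks_above_hole_amount board) := by
  unfold Pre_blocks_above_hole_amount; infer_instance
def pvWitness_blocks_above_hole_amount : List (List Int) := [[0, 0], [1, 1], [0, 0]]

def Spec_blocks_above_hole_amount (board : List (List Int)) (out : Int) : Prop := out = blocks_above_hole_amount_alt board
instance (board : List (List Int)) (out : Int) : Decidable (Spec_blocks_above_hole_amount board out) := by unfold Spec_blocks_above_hole_amount; infer_instance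

-- ===== CLAIM (what is proved, stated in full; the proofs are below) =====
def Claim_equal_blocks_above_hole_amount : Prop := ∀ (board : List (List Int)), Dom_blocks_above_hole_amount board → Pre_blocks_above_hole_amount board → Spec_blocks_above_hole_amount board (blocks_above_hole_amount board)

-- ===== LEMMAS AND PROOFS =====

-- the column x of the board, as the list of its cells top to bottom
def pvColAt (board : List (List Int)) (x : Int) : List Int :=
  board.map (fun row => PySem.List.pyGetD row x 0)

-- B's inner loop on one column, as structural recursion (seen flag, current run)
def pvBrec : List Int → Bool → Int → Int
  | [], _, _ => 0
  | cell :: rest, s, r =>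
    if cell != 0 then pvBrec rest true (r + 1)
    else (if s then r else 0) + pvBrec rest s 0

-- what A adds per column, as structural recursion: seen flag, current run length r,
-- and t = "the run reaches row 0" (there A's scan stops at row 1 and adds r - 1)
def pvArec : List Int → Bool → Int → Bool → Int
  | [], _, _, _ => 0
  | cell :: rest, s, r, t =>
    (if s && (cell == 0) then (if t then r - 1 else r) else 0) +
      pvArec rest (s || (cell != 0)) (if cell != 0 then r + 1 else 0) (t && (cell != 0))

-- the hole row indices of one column, as find_holes scans it
def pvHolesIdx : List Int → Int → Bool → List Int
  | [], _, _ => []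
  | cell :: rest, y, s =>
    if s && (cell == 0) then y :: pvHolesIdx rest (y + 1) s
    else pvHolesIdx rest (y + 1) (s || (cell != 0))

-- the value A's upward scan computes for a hole at row y of column c
def pvAup (c : List Int) (y : Int) : Int :=
  ((((PySem.List.pyRange (y - 1) 0 (-1)).map (fun j => PySem.List.pyGetD c j 0)).takeWhile
      (fun v => v != 0)).length : Int)

-- length of the blocked suffix of p (the run just above the next row)
def pvBsl (p : List Int) : Int :=
  (((p.reverse.takeWhile (fun v => v != 0)).length : Int))

-- a column whose first empty cell sits at row ≥ 1 under a solid run from row 0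
def pvBadTop (c : List Int) : Bool := (c.headD 0 != 0) && c.tail.contains 0

-- find_holes inner-loop body, named so the unfolded port matches the lemma below
def pvHBody (x : Int) (st : List (Int × Int) × Bool) (p : Int × List Int) : List (Int × Int) × Bool :=
  let cell := PySem.List.pyGetD p.2 x 0
  if st.2 && pvEmpty cell then (st.1 ++ [(x, p.1)], st.2)
  else if pvBlocked cell then (st.1, true)
  else st

theorem pv_break_frozen (l : List Int) (g : Int → Bool) (st : Int × Bool) (h : st.2 = true) :
    l.foldl (fun st y => if st.2 then st else if g y then (st.1 + 1, false) else (st.1, true)) st = st := by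
  induction l with
  | nil => rfl
  | cons a l ih => simpa [h] using ih

theorem pv_break_count (l : List Int) (g : Int → Bool) (i : Int) :
    (l.foldl (fun st y => if st.2 then st else if g y then (st.1 + 1, false) else (st.1, true)) (i, false)).1
      = i + ((l.takeWhile g).length : Int) := by
  induction l generalizing i with
  | nil => simp
  | cons a l ih =>
    rw [List.foldl_cons]
    by_cases hg : g a
    · simp only [Bool.false_eq_true, if_false, hg, if_true]
      rw [ih, List.takeWhile_cons_of_pos hg]
      simp only [List.length_cons]
      push_cast; ring
    · simp only [Bool.false_eq_true, if_false, hg]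
      rw [pv_break_frozen _ g _ rfl, List.takeWhile_cons_of_neg hg]
      simp

theorem pv_scan_eq_aup (board : List (List Int)) (x y i : Int) :
    ((PySem.List.pyRange (y - 1) 0 (-1)).foldl
      (fun (st : Int × Bool) j =>
        if st.2 then st
        else if pvBlocked (PySem.List.pyGetD (PySem.List.pyGetD board j []) x 0) then (st.1 + 1, false)
        else (st.1, true)) (i, false)).1 = i + pvAup (pvColAt board x) y := by
  have hf : ∀ j : Int, PySem.List.pyGetD (pvColAt board x) j 0
      = PySem.List.pyGetD (PySem.List.pyGetD board j []) x 0 := by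
    intro j
    have h := PySem.List.pyGetD_map (fun row => PySem.List.pyGetD row x 0) board j []
    have h0 : PySem.List.pyGetD ([] : List Int) x 0 = 0 := by
      simp [PySem.List.pyGetD, PySem.List.pyGet?, PySem.List.pyIdx?]
    rw [h0] at h
    simpa [pvColAt] using h
  rw [pv_break_count]
  unfold pvAup
  congr 2
  rw [List.takeWhile_map, List.length_map]
  have hfun : ((fun v => v != 0) ∘ fun j => PySem.List.pyGetD (pvColAt board x) j 0)
      = fun j => pvBlocked (PySem.List.pyGetD (PySem.List.pyGetD board j []) x 0) := by
    funext j
    simp [Function.comp, hf j, pvBlocked]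
  rw [hfun]

theorem pv_holes_inner (x : Int) (rows : List (List Int)) (y0 : Int) (acc : List (Int × Int)) (s : Bool) :
    (PySem.List.enumerate rows y0).foldl (pvHBody x) (acc, s)
      = (acc ++ (pvHolesIdx (rows.map (fun row => PySem.List.pyGetD row x 0)) y0 s).map (fun y => (x, y)),
         s || (rows.map (fun row => PySem.List.pyGetD row x 0)).any (fun v => v != 0)) := by
  induction rows generalizing y0 acc s with
  | nil => simp [pvHolesIdx, PySem.List.enumerate]
  | cons row rows ih =>
    rw [PySem.List.enumerate_cons, List.foldl_cons]
    by_cases hc : PySem.List.pyGetD row x 0 = 0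
    · have hb : (PySem.List.pyGetD row x 0 == 0) = true := by simp [hc]
      have hbn : (PySem.List.pyGetD row x 0 != 0) = false := by simp [hc]
      cases s with
      | true =>
        have hstep : pvHBody x (acc, true) (y0, row) = (acc ++ [(x, y0)], true) := by
          simp [pvHBody, pvEmpty, hb]
        rw [hstep, ih]
        simp [pvHolesIdx, hb, hbn]
      | false =>
        have hstep : pvHBody x (acc, false) (y0, row) = (acc, false) := by
          simp [pvHBody, pvEmpty, pvBlocked, hb, hbn]
        rw [hstep, ih]
        simp [pvHolesIdx, hb, hbn]
    · have hb : (PySem.List.pyGetD row x 0 == 0) = false := by simp [hc]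
      have hbn : (PySem.List.pyGetD row x 0 != 0) = true := by simp [hc]
      cases s with
      | true =>
        have hstep : pvHBody x (acc, true) (y0, row) = (acc, true) := by
          simp [pvHBody, pvEmpty, pvBlocked, hb, hbn]
        rw [hstep, ih]
        simp [pvHolesIdx, hb, hbn]
      | false =>
        have hstep : pvHBody x (acc, false) (y0, row) = (acc, true) := by
          simp [pvHBody, pvEmpty, pvBlocked, hb, hbn]
        rw [hstep, ih]
        simp [pvHolesIdx, hb, hbn]

theorem pv_findHoles_eq (board : List (List Int)) :
    pvFindHoles board
      = (PySem.List.pyRange 0 ((board.headD []).length : Int) 1).flatMap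
          (fun x => (pvHolesIdx (pvColAt board x) 0 false).map (fun y => (x, y))) := by
  unfold pvFindHoles
  rw [PySem.List.foldl_congr_mem _ _
    (fun holes x => holes ++ (pvHolesIdx (pvColAt board x) 0 false).map (fun y => (x, y))) _ ?_]
  · rw [PySem.List.foldl_append_eq_flatMap]
    simp
  · intro acc x hx
    show ((PySem.List.pyRange 0 ((board.length : Int)) 1).foldl
      (fun st y => pvHBody x st (y, PySem.List.pyGetD board y [])) (acc, false)).1 = _
    have h1 : (PySem.List.pyRange 0 ((board.length : Int)) 1).foldl
        (fun st y => pvHBody x st (y, PySem.List.pyGetD board y [])) (acc, false)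
        = (PySem.List.enumerate board 0).foldl (pvHBody x) (acc, false) := by
      rw [PySem.List.enumerate_eq_map_pyRange board [], List.foldl_map]
      simp
    rw [h1, pv_holes_inner]
    rfl

theorem pv_A_sum (board : List (List Int)) :
    blocks_above_hole_amount board
      = ((PySem.List.pyRange 0 ((board.headD []).length : Int) 1).map
          (fun x => ((pvHolesIdx (pvColAt board x) 0 false).map (fun y => pvAup (pvColAt board x) y)).sum)).sum := by
  unfold blocks_above_hole_amount
  rw [PySem.List.foldl_congr_mem _ _
    (fun i h => i + pvAup (pvColAt board h.1) h.2) 0 ?_]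
  · rw [PySem.List.foldl_add, pv_findHoles_eq, zero_add, List.map_flatMap,
      List.flatMap_def, List.sum_flatten, List.map_map]
    congr 1
    refine List.map_congr_left fun x hx => ?_
    simp only [Function.comp_apply, List.map_map]
    rfl
  · intro acc h hmem
    exact pv_scan_eq_aup board h.1 h.2 acc



theorem pv_bsl_append (p : List Int) (cell : Int) :
    pvBsl (p ++ [cell]) = if cell != 0 then pvBsl p + 1 else 0 := by
  unfold pvBsl
  by_cases hc : cell = 0
  · have hb : (cell != 0) = false := by simp [hc]
    simp [hb]
  · have hb : (cell != 0) = true := by simp [hc]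
    simp [hb]

theorem pv_takeWhile_len_iff (l : List Int) (P : Int → Bool) :
    ((l.takeWhile P).length = l.length) ↔ l.all P := by
  constructor
  · intro h
    have := (List.takeWhile_prefix (p := P) (l := l)).eq_of_length h
    rw [List.all_eq_true]
    intro a ha
    exact List.mem_takeWhile_imp (this ▸ ha)
  · intro h
    rw [List.takeWhile_eq_self_iff.2 (by simpa [List.all_eq_true] using h)]

theorem pv_bsl_all (p : List Int) (h : p.all (fun v => v != 0) = true) :
    pvBsl p = (p.length : Int) := by
  unfold pvBsl
  rw [(pv_takeWhile_len_iff _ _).2 (by simpa using h)]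
  simp

theorem pv_aup_append (p l : List Int) :
    pvAup (p ++ l) (p.length : Int)
      = ((p.tail.reverse.takeWhile (fun v => v != 0)).length : Int) := by
  unfold pvAup
  have hmap : (PySem.List.pyRange ((p.length : Int) - 1) 0 (-1)).map
      (fun j => PySem.List.pyGetD (p ++ l) j 0) = p.tail.reverse := by
    cases p with
    | nil => simp [PySem.List.pyRange_neg_one_eq_nil (by omega : (-1 : Int) ≤ 0)]
    | cons h t =>
      apply List.ext_getElem
      · simp [PySem.List.length_pyRange_neg_one]
      · intro k hk1 hk2
        simp only [List.getElem_map]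
        have hkb : k < t.length := by simpa using hk2
        have hpf : k < (PySem.List.pyRange ((↑(h :: t).length : Int) - 1) 0 (-1)).length := by
          rw [PySem.List.length_pyRange_neg_one]; simp; omega
        have hidx : (PySem.List.pyRange ((↑(h :: t).length : Int) - 1) 0 (-1))[k]'hpf
            = ((t.length : Int) - k) := by
          simp only [PySem.List.pyRange_neg_one, List.getElem_map, List.getElem_range]
          push_cast [List.length_cons]
          omega
        simp only [hidx]
        have h0 : (0:Int) ≤ (t.length : Int) - k := by omega
        have h1 : (t.length : Int) - k < ((h :: t ++ l).length : Int) := by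
          simp only [List.cons_append, List.length_cons, List.length_append]
          push_cast; omega
        rw [PySem.List.pyGetD_eq_getElem _ _ h0 h1]
        have htn : ((t.length : Int) - (k : Int)).toNat = t.length - k := by omega
        simp only [htn]
        rw [List.getElem_append_left (by simp only [List.length_cons]; omega)]
        simp only [List.tail_cons, List.getElem_reverse]
        simp only [show t.length - k = (t.length - 1 - k) + 1 from by omega, List.getElem_cons_succ]
  rw [hmap]

theorem pv_core (p : List Int) (hp : p ≠ []) :
    ((p.tail.reverse.takeWhile (fun v => v != 0)).length : Int)
      = if p.all (fun v => v != 0) then (p.length : Int) - 1 else pvBsl p := by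
  cases p with
  | nil => exact absurd rfl hp
  | cons h t =>
    simp only [List.tail_cons]
    by_cases hall : t.all (fun v => v != 0) = true
    · have hlen : (t.reverse.takeWhile (fun v => v != 0)).length = t.reverse.length := by
        rw [pv_takeWhile_len_iff]; simpa using hall
      by_cases hh : (h != 0) = true
      · have hA : ((h :: t).all (fun v => v != 0)) = true := by
          simp [List.all_cons, hh, hall]
        rw [hA, if_pos rfl]
        simp only [List.length_reverse] at hlen
        simp [hlen]
      · have hA : ((h :: t).all (fun v => v != 0)) = false := by
          simp only [List.all_cons, hh, Bool.false_and]
        rw [hA]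
        simp only [Bool.false_eq_true, if_false]
        unfold pvBsl
        rw [show (h :: t).reverse = t.reverse ++ [h] by simp,
          List.takeWhile_append, if_pos hlen]
        simp only [List.length_reverse] at hlen
        simp [hh, hlen]
    · have hallf : t.all (fun v => v != 0) = false := by simpa using hall
      have hA : ((h :: t).all (fun v => v != 0)) = false := by
        simp [List.all_cons, hallf]
      rw [hA]
      simp only [Bool.false_eq_true, if_false]
      unfold pvBsl
      have hlt : (t.reverse.takeWhile (fun v => v != 0)).length ≠ t.reverse.length := by
        rw [ne_eq, pv_takeWhile_len_iff]
        simpa using hall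
      rw [show (h :: t).reverse = t.reverse ++ [h] by simp,
        List.takeWhile_append, if_neg hlt]

theorem pv_sum_holes (rest : List Int) : ∀ (p : List Int),
    ((pvHolesIdx rest (p.length : Int) (p.any (fun v => v != 0))).map (fun y => pvAup (p ++ rest) y)).sum
      = pvArec rest (p.any (fun v => v != 0)) (pvBsl p) (p.all (fun v => v != 0)) := by
  induction rest with
  | nil => intro p; simp [pvHolesIdx, pvArec]
  | cons cell rest ih =>
    intro p
    have happ : p ++ cell :: rest = (p ++ [cell]) ++ rest := by simp
    have hlen2 : ((p ++ [cell]).length : Int) = (p.length : Int) + 1 := by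
      simp
    have h2 := ih (p ++ [cell])
    rw [← happ] at h2
    rw [hlen2] at h2
    by_cases hc : cell = 0
    · have hb : (cell != 0) = false := by simp [hc]
      have hany : (p ++ [cell]).any (fun v => v != 0) = p.any (fun v => v != 0) := by
        simp [List.any_append, hb]
      have hall : (p ++ [cell]).all (fun v => v != 0) = false := by
        simp [List.all_append, hb]
      have hbsl : pvBsl (p ++ [cell]) = 0 := by rw [pv_bsl_append, hb]; simp
      rw [hany, hall, hbsl] at h2
      by_cases hs : p.any (fun v => v != 0) = true
      · have hcond : (p.any (fun v => v != 0) && (cell == 0)) = true := by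
          simp [hs, hc]
        have hp : p ≠ [] := by
          rintro rfl; simp at hs
        have h1 : pvAup (p ++ cell :: rest) (p.length : Int)
            = if p.all (fun v => v != 0) then pvBsl p - 1 else pvBsl p := by
          rw [pv_aup_append p (cell :: rest), pv_core p hp]
          by_cases ha : p.all (fun v => v != 0) = true
          · rw [if_pos ha, if_pos ha, pv_bsl_all p ha]
          · have haf : p.all (fun v => v != 0) = false := by simpa using ha
            rw [haf]
            simp
        simp only [pvHolesIdx, hcond, if_true, List.map_cons, List.sum_cons, pvArec, hb,
          Bool.or_false, Bool.false_eq_true, if_false, Bool.and_false]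
        rw [h1, h2, hs]
      · have hsf : p.any (fun v => v != 0) = false := by simpa using hs
        have hcond : (p.any (fun v => v != 0) && (cell == 0)) = false := by
          simp [hsf]
        simp only [pvHolesIdx, hcond, Bool.false_eq_true, if_false, pvArec, hb,
          Bool.or_false, Bool.and_false]
        rw [h2, zero_add]
    · have hb : (cell != 0) = true := by simp [hc]
      have hbe : (cell == 0) = false := by simp [hc]
      have hany : (p ++ [cell]).any (fun v => v != 0) = true := by
        simp [List.any_append, hb]
      have hall : (p ++ [cell]).all (fun v => v != 0) = p.all (fun v => v != 0) := by
        simp [List.all_append, hb]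
      have hbsl : pvBsl (p ++ [cell]) = pvBsl p + 1 := by rw [pv_bsl_append, hb]; simp
      rw [hany, hall, hbsl] at h2
      have hcond : (p.any (fun v => v != 0) && (cell == 0)) = false := by
        simp [hbe]
      simp only [pvHolesIdx, hcond, Bool.false_eq_true, if_false, pvArec, hb, if_true,
        Bool.or_true, Bool.and_true]
      rw [h2, zero_add]

theorem pv_brec_arec_false (c : List Int) (s : Bool) (r : Int) :
    pvBrec c s r = pvArec c s r false := by
  induction c generalizing s r with
  | nil => rfl
  | cons cell rest ih =>
    by_cases hc : cell = 0
    · have hb : (cell != 0) = false := by simp [hc]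
      cases s <;> simp [pvBrec, pvArec, hb, hc, ih]
    · have hb : (cell != 0) = true := by simp [hc]
      cases s <;> simp [pvBrec, pvArec, hb, hc, ih]

theorem pv_brec_arec_true (c : List Int) (r : Int) :
    pvBrec c true r = pvArec c true r true + (if c.contains 0 then 1 else 0) := by
  induction c generalizing r with
  | nil => simp [pvBrec, pvArec]
  | cons cell rest ih =>
    by_cases hc : cell = 0
    · have hb : (cell != 0) = false := by simp [hc]
      simp [pvBrec, pvArec, hb, hc, ← pv_brec_arec_false]
      ring
    · have hb : (cell != 0) = true := by simp [hc]
      have h0 : ¬ ((0:Int) = cell) := fun h => hc h.symm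
      simp [pvBrec, pvArec, hb, hc, h0, ih]

theorem pv_brec_arec (c : List Int) :
    pvBrec c false 0 = pvArec c false 0 true + (if pvBadTop c then 1 else 0) := by
  cases c with
  | nil => simp [pvBrec, pvArec, pvBadTop]
  | cons cell rest =>
    by_cases hc : cell = 0
    · have hb : (cell != 0) = false := by simp [hc]
      simp [pvBrec, pvArec, pvBadTop, hb, ← pv_brec_arec_false]
    · have hb : (cell != 0) = true := by simp [hc]
      simp [pvBrec, pvArec, pvBadTop, hb, pv_brec_arec_true]

-- B's inner loop value stream, as structural recursion over the bottom-up column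
def pvCov : List Int → Bool → Int
  | [], _ => 0
  | cell :: rest, b =>
    if cell == 0 then pvCov rest true
    else (if b then 1 else 0) + pvCov rest b

theorem pv_cov_fold (l : List Int) (i : Int) (b : Bool) :
    (l.foldl (fun (st : Int × Bool) cell =>
        if cell == 0 then (st.1, true)
        else if st.2 then (st.1 + 1, st.2)
        else st) (i, b)).1 = i + pvCov l b := by
  induction l generalizing i b with
  | nil => simp [pvCov]
  | cons cell rest ih =>
    rw [List.foldl_cons]
    by_cases hc : cell = 0
    · have hb : (cell == 0) = true := by simp [hc]
      simp only [hb, if_true]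
      rw [ih]
      simp only [pvCov, hb, if_true]
    · have hb : (cell == 0) = false := by simp [hc]
      cases b with
      | true =>
        simp only [hb, Bool.false_eq_true, if_false, if_true]
        rw [ih]
        simp only [pvCov, hb, Bool.false_eq_true, if_false, if_true]
        ring
      | false =>
        simp only [hb, Bool.false_eq_true, if_false]
        rw [ih]
        simp only [pvCov, hb, Bool.false_eq_true, if_false]
        ring

-- the list of column values B's inner countdown loop visits: rows H-1 … 1, bottom-up
theorem pv_rev_tail_map (c : List Int) :
    (PySem.List.pyRange ((c.length : Int) - 1) 0 (-1)).map (fun j => PySem.List.pyGetD c j 0)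
      = c.tail.reverse := by
  cases c with
  | nil => simp [PySem.List.pyRange_neg_one_eq_nil (by omega : (-1 : Int) ≤ 0)]
  | cons h t =>
    apply List.ext_getElem
    · simp [PySem.List.length_pyRange_neg_one]
    · intro k hk1 hk2
      simp only [List.getElem_map]
      have hkb : k < t.length := by simpa using hk2
      have hpf : k < (PySem.List.pyRange ((↑(h :: t).length : Int) - 1) 0 (-1)).length := by
        rw [PySem.List.length_pyRange_neg_one]; simp; omega
      have hidx : (PySem.List.pyRange ((↑(h :: t).length : Int) - 1) 0 (-1))[k]'hpf
          = ((t.length : Int) - k) := by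
        simp only [PySem.List.pyRange_neg_one, List.getElem_map, List.getElem_range]
        push_cast [List.length_cons]
        omega
      simp only [hidx]
      have h0 : (0:Int) ≤ (t.length : Int) - k := by omega
      have h1 : (t.length : Int) - k < ((h :: t).length : Int) := by
        simp only [List.length_cons]; push_cast; omega
      rw [PySem.List.pyGetD_eq_getElem _ _ h0 h1]
      have htn : ((t.length : Int) - (k : Int)).toNat = t.length - k := by omega
      simp only [htn]
      simp only [List.tail_cons, List.getElem_reverse]
      simp only [show t.length - k = (t.length - 1 - k) + 1 from by omega, List.getElem_cons_succ]

theorem pv_B_sum (board : List (List Int)) :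
    blocks_above_hole_amount_alt board
      = ((PySem.List.pyRange 0 ((board.headD []).length : Int) 1).map
          (fun x => pvCov (pvColAt board x).tail.reverse false)).sum := by
  unfold blocks_above_hole_amount_alt
  rw [PySem.List.foldl_congr_mem _ _
    (fun total x => total + pvCov (pvColAt board x).tail.reverse false) 0 ?_]
  · rw [PySem.List.foldl_add, zero_add]
  · intro total x hx
    have hf : ∀ j : Int, PySem.List.pyGetD (pvColAt board x) j 0
        = PySem.List.pyGetD (PySem.List.pyGetD board j []) x 0 := by
      intro j
      have h := PySem.List.pyGetD_map (fun row => PySem.List.pyGetD row x 0) board j []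
      have h0 : PySem.List.pyGetD ([] : List Int) x 0 = 0 := by
        simp [PySem.List.pyGetD, PySem.List.pyGet?, PySem.List.pyIdx?]
      rw [h0] at h
      simpa [pvColAt] using h
    rw [PySem.List.foldl_congr_mem _ _
      (fun (st : Int × Bool) y =>
        if PySem.List.pyGetD (pvColAt board x) y 0 == 0 then (st.1, true)
        else if st.2 then (st.1 + 1, st.2)
        else st) _ (fun acc y _ => by simp only [hf y])]
    have hlen : (board.length : Int) - 1 = ((pvColAt board x).length : Int) - 1 := by
      simp [pvColAt]
    rw [hlen,
      ← List.foldl_map (f := fun j => PySem.List.pyGetD (pvColAt board x) j 0)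
        (g := fun (st : Int × Bool) cell =>
          if cell == 0 then (st.1, true)
          else if st.2 then (st.1 + 1, st.2)
          else st),
      pv_rev_tail_map, pv_cov_fold]

theorem pv_cov_append_single (l : List Int) (h : Int) (b : Bool) :
    pvCov (l ++ [h]) b
      = pvCov l b + (if (h != 0) && (b || l.contains 0) then 1 else 0) := by
  induction l generalizing b with
  | nil =>
    by_cases hh : h = 0
    · have hb : (h == 0) = true := by simp [hh]
      have hbn : (h != 0) = false := by simp [hh]
      simp [pvCov, hb, hbn]
    · have hb : (h == 0) = false := by simp [hh]
      have hbn : (h != 0) = true := by simp [hh]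
      cases b <;> simp [pvCov, hb, hbn]
  | cons cell rest ih =>
    by_cases hc : cell = 0
    · have hb : (cell == 0) = true := by simp [hc]
      simp only [List.cons_append, pvCov, hb, if_true, ih]
      have : (b || (cell :: rest).contains 0) = true := by simp [hc]
      rw [this]
      simp
    · have hb : (cell == 0) = false := by simp [hc]
      have hmem : (cell :: rest).contains 0 = rest.contains 0 := by
        simp [List.contains_cons, Ne.symm hc]
      simp only [List.cons_append, pvCov, hb, Bool.false_eq_true, if_false, ih, hmem]
      ring

theorem pv_brec_cov (c : List Int) :
    (∀ r : Int, pvBrec c true r = (if c.contains 0 then r else 0) + pvCov c.reverse false)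
      ∧ pvBrec c false 0 = pvCov c.reverse false := by
  induction c with
  | nil => simp [pvBrec, pvCov]
  | cons cell rest ih =>
    have hrev : (cell :: rest).reverse = rest.reverse ++ [cell] := by simp
    have hsingle := fun b => pv_cov_append_single rest.reverse cell b
    have hmemrev : rest.reverse.contains 0 = rest.contains 0 := by
      simp [List.contains_iff_mem]
    by_cases hc : cell = 0
    · have hb : (cell != 0) = false := by simp [hc]
      have hmem : (cell :: rest).contains 0 = true := by simp [hc]
      constructor
      · intro r
        simp only [pvBrec, hb, Bool.false_eq_true, if_false, if_true, hmem,
          hrev]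
        rw [hsingle false, hmemrev, (ih.1 0)]
        simp [hb]
      · simp only [pvBrec, hb, Bool.false_eq_true, if_false, hrev]
        rw [hsingle false, hmemrev, ih.2]
        simp [hb]
    · have hb : (cell != 0) = true := by simp [hc]
      have hmem : (cell :: rest).contains 0 = rest.contains 0 := by
        simp [List.contains_cons, Ne.symm hc]
      constructor
      · intro r
        simp only [pvBrec, hb, if_true, hmem, hrev]
        rw [hsingle false, hmemrev, ih.1 (r + 1)]
        cases hr : rest.contains 0 <;> simp [hb, hr] <;> ring
      · simp only [pvBrec, hb, if_true, hmem, hrev]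
        rw [hsingle false, hmemrev, ih.1 (0 + 1)]
        cases hr : rest.contains 0 <;> simp [hb, hr] <;> ring

theorem pv_arec_cov (c : List Int) :
    pvArec c false 0 true = pvCov c.tail.reverse false := by
  have hb := pv_brec_arec c
  have hcov := (pv_brec_cov c).2
  cases c with
  | nil => simp [pvArec, pvCov]
  | cons h t =>
    have hrev : (h :: t).reverse = t.reverse ++ [h] := by simp
    rw [hrev] at hcov
    rw [pv_cov_append_single t.reverse h false] at hcov
    have hmemrev : t.reverse.contains 0 = t.contains 0 := by
      simp [List.contains_iff_mem]
    rw [hmemrev] at hcov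
    have hbad : pvBadTop (h :: t) = ((h != 0) && (false || t.contains 0)) := by
      simp [pvBadTop]
    rw [hbad] at hb
    simp only [List.tail_cons]
    omega

theorem pv_master (board : List (List Int)) :
    blocks_above_hole_amount_alt board = blocks_above_hole_amount board := by
  rw [pv_A_sum, pv_B_sum]
  have hA : ∀ c : List Int,
      ((pvHolesIdx c 0 false).map (fun y => pvAup c y)).sum = pvArec c false 0 true := by
    intro c
    have h := pv_sum_holes c []
    simpa [pvBsl] using h
  refine congrArg List.sum (List.map_congr_left fun x _ => ?_)
  rw [hA (pvColAt board x), pv_arec_cov]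

-- ===== VERDICT (by name: the statement is the Claim_ definition above) =====
theorem blocks_above_hole_amount_spec : Claim_equal_blocks_above_hole_amount := by
  intro board _ _
  unfold Spec_blocks_above_hole_amount
  exact (pv_master board).symm
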